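-- pv_equiv track=rewrite | github.com/openturf/runwayguard | functions/core_calculations.py | parse_enhanced_weather_conditions
-- ===== SOURCE A (Python) =====
-- def parse_enhanced_weather_conditions(metar_data):
--     score = 0
--     reasons = []
--
--     weather = metar_data.get("weather", [])
--
--     if any("FG" in condition for condition in weather):
--         score += 15
--         reasons.append("Fog conditions reduce visibility")
--
--     if any("BR" in condition or "HZ" in condition for condition in weather):
--         score += 5
--         reasons.append("Mist or haze reducing visibility")
--
--     if any("DU" in condition or "SA" in condition or "DS" in condition for condition in weather):
--         score += 20
--         reasons.append("Dust or sand affecting visibility")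
--
--     if any("VA" in condition for condition in weather):
--         score += 100
--         reasons.append("Volcanic ash - NO-GO condition")
--
--     if any("SQ" in condition for condition in weather):
--         score += 30
--         reasons.append("Squall line activity")
--
--     return score, reasons
-- ===== SOURCE B (Python) =====
-- def parse_enhanced_weather_conditions(metar_data):
--     # Single pass over the weather list setting five flags, then fixed-order emission.
--     fg = brhz = dusads = va = sq = False
--     for condition in metar_data.get("weather", []):
--         fg = fg or ("FG" in condition)
--         brhz = brhz or ("BR" in condition) or ("HZ" in condition)
--         dusads = dusads or ("DU" in condition) or ("SA" in condition) or ("DS" in condition)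
--         va = va or ("VA" in condition)
--         sq = sq or ("SQ" in condition)
--     table = [
--         (fg, 15, "Fog conditions reduce visibility"),
--         (brhz, 5, "Mist or haze reducing visibility"),
--         (dusads, 20, "Dust or sand affecting visibility"),
--         (va, 100, "Volcanic ash - NO-GO condition"),
--         (sq, 30, "Squall line activity"),
--     ]
--     score = sum(pts for flag, pts, _ in table if flag)
--     reasons = [msg for flag, _, msg in table if flag]
--     return score, reasons
-- ===== Notes on version B (the rewrite author's own statement) =====
-- stated objective: alternative
-- what changed: Five separate any()-scans of the weather list are replaced by one pass that sets five boolean flags, after which score and reasons are emitted from a fixed table in branch order.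
import Mathlib
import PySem

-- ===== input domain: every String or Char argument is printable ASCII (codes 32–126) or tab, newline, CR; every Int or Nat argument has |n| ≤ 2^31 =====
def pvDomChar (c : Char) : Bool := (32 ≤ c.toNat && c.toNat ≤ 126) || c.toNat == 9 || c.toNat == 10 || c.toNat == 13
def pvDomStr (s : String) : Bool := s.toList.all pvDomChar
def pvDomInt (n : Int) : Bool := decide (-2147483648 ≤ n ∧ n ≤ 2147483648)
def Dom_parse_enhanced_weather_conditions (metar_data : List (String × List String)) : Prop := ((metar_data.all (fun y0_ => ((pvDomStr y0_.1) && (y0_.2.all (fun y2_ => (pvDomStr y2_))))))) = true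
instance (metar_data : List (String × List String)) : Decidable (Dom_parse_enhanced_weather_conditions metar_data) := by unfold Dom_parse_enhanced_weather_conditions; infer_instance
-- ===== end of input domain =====

-- ===== PORT A =====
def parse_enhanced_weather_conditions (metar_data : List (String × List String)) : Int × List String :=
  let weather := PySem.Dict.getD (PySem.Dict.mk metar_data) "weather" []
  let score : Int := 0
  let reasons : List String := []
  let (score, reasons) :=
    if weather.any (fun condition => PySem.Str.isIn "FG" condition) then
      (score + 15, reasons ++ ["Fog conditions reduce visibility"]) else (score, reasons)
  let (score, reasons) :=
    if weather.any (fun condition => PySem.Str.isIn "BR" condition || PySem.Str.isIn "HZ" condition) then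
      (score + 5, reasons ++ ["Mist or haze reducing visibility"]) else (score, reasons)
  let (score, reasons) :=
    if weather.any (fun condition => PySem.Str.isIn "DU" condition || PySem.Str.isIn "SA" condition || PySem.Str.isIn "DS" condition) then
      (score + 20, reasons ++ ["Dust or sand affecting visibility"]) else (score, reasons)
  let (score, reasons) :=
    if weather.any (fun condition => PySem.Str.isIn "VA" condition) then
      (score + 100, reasons ++ ["Volcanic ash - NO-GO condition"]) else (score, reasons)
  let (score, reasons) :=
    if weather.any (fun condition => PySem.Str.isIn "SQ" condition) then
      (score + 30, reasons ++ ["Squall line activity"]) else (score, reasons)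
  (score, reasons)

-- ===== PORT B =====
-- B: one fold over the weather list accumulating five flags, then fixed-order emission from a table.
def parse_enhanced_weather_conditions_alt (metar_data : List (String × List String)) : Int × List String :=
  let weather := PySem.Dict.getD (PySem.Dict.mk metar_data) "weather" []
  let flags : Bool × Bool × Bool × Bool × Bool :=
    weather.foldl (fun f condition =>
      (f.1 || PySem.Str.isIn "FG" condition,
       f.2.1 || PySem.Str.isIn "BR" condition || PySem.Str.isIn "HZ" condition,
       f.2.2.1 || PySem.Str.isIn "DU" condition || PySem.Str.isIn "SA" condition || PySem.Str.isIn "DS" condition,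
       f.2.2.2.1 || PySem.Str.isIn "VA" condition,
       f.2.2.2.2 || PySem.Str.isIn "SQ" condition))
      (false, false, false, false, false)
  let table : List (Bool × Int × String) :=
    [(flags.1, 15, "Fog conditions reduce visibility"),
     (flags.2.1, 5, "Mist or haze reducing visibility"),
     (flags.2.2.1, 20, "Dust or sand affecting visibility"),
     (flags.2.2.2.1, 100, "Volcanic ash - NO-GO condition"),
     (flags.2.2.2.2, 30, "Squall line activity")]
  let score : Int := ((table.filter (fun t => t.1)).map (fun t => t.2.1)).sum
  let reasons : List String := (table.filter (fun t => t.1)).map (fun t => t.2.2)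
  (score, reasons)

-- ===== PRECONDITION & SPEC =====
def Spec_parse_enhanced_weather_conditions (metar_data : List (String × List String)) (out : Int × List String) : Prop := out = parse_enhanced_weather_conditions_alt metar_data
instance (metar_data : List (String × List String)) (out : Int × List String) : Decidable (Spec_parse_enhanced_weather_conditions metar_data out) := by unfold Spec_parse_enhanced_weather_conditions; infer_instance

-- ===== CLAIM (what is proved, stated in full; the proofs are below) =====
def Claim_equal_parse_enhanced_weather_conditions : Prop := ∀ (metar_data : List (String × List String)), Dom_parse_enhanced_weather_conditions metar_data → Spec_parse_enhanced_weather_conditions metar_data (parse_enhanced_weather_conditions metar_data)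

-- ===== LEMMAS AND PROOFS =====
lemma flags_fold_eq :
    ∀ (xs : List String) (a b c d e : Bool),
      xs.foldl (fun (f : Bool × Bool × Bool × Bool × Bool) condition =>
        (f.1 || PySem.Str.isIn "FG" condition,
         f.2.1 || PySem.Str.isIn "BR" condition || PySem.Str.isIn "HZ" condition,
         f.2.2.1 || PySem.Str.isIn "DU" condition || PySem.Str.isIn "SA" condition || PySem.Str.isIn "DS" condition,
         f.2.2.2.1 || PySem.Str.isIn "VA" condition,
         f.2.2.2.2 || PySem.Str.isIn "SQ" condition))
        (a, b, c, d, e)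
      = (a || xs.any (fun condition => PySem.Str.isIn "FG" condition),
         b || xs.any (fun condition => PySem.Str.isIn "BR" condition || PySem.Str.isIn "HZ" condition),
         c || xs.any (fun condition => PySem.Str.isIn "DU" condition || PySem.Str.isIn "SA" condition || PySem.Str.isIn "DS" condition),
         d || xs.any (fun condition => PySem.Str.isIn "VA" condition),
         e || xs.any (fun condition => PySem.Str.isIn "SQ" condition)) := by
  intro xs
  induction xs with
  | nil => simp
  | cons x xs ih =>
    intro a b c d e
    rw [List.foldl_cons, ih]
    simp [List.any_cons, Bool.or_assoc]

-- ===== VERDICT (by name: the statement is the Claim_ definition above) =====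
theorem parse_enhanced_weather_conditions_spec : Claim_equal_parse_enhanced_weather_conditions := by
  intro metar_data _
  unfold Spec_parse_enhanced_weather_conditions
  unfold parse_enhanced_weather_conditions parse_enhanced_weather_conditions_alt
  simp only [flags_fold_eq, Bool.false_or]
  generalize (PySem.Dict.getD (PySem.Dict.mk metar_data) "weather" []).any
      (fun condition => PySem.Str.isIn "FG" condition) = a1
  generalize (PySem.Dict.getD (PySem.Dict.mk metar_data) "weather" []).any
      (fun condition => PySem.Str.isIn "BR" condition || PySem.Str.isIn "HZ" condition) = a2
  generalize (PySem.Dict.getD (PySem.Dict.mk metar_data) "weather" []).any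
      (fun condition => PySem.Str.isIn "DU" condition || PySem.Str.isIn "SA" condition || PySem.Str.isIn "DS" condition) = a3
  generalize (PySem.Dict.getD (PySem.Dict.mk metar_data) "weather" []).any
      (fun condition => PySem.Str.isIn "VA" condition) = a4
  generalize (PySem.Dict.getD (PySem.Dict.mk metar_data) "weather" []).any
      (fun condition => PySem.Str.isIn "SQ" condition) = a5
  cases a1 <;> cases a2 <;> cases a3 <;> cases a4 <;> cases a5 <;> simp
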